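-- pv_equiv track=rewrite | github.com/zzf-damon/python | writtenTest/冰雹思想-人.py | solution
-- ===== SOURCE A (Python) =====
-- def solution(N, L):
--     res = 0
--
--     def dfs(index):
--         count = N
--         pre = index - 1 if index > 0 else -1
--         pro = index + 1 if index < N - 1 else N
--         k = pre + 1
--         while pre > -1:
--             if L[pre] >= L[k]:
--                 count -= 1
--             else:
--                 k = pre
--             pre -= 1
--         k = pro - 1
--         while pro < N:
--             if L[pro] >= L[k]:
--                 count -= 1
--             else:
--                 k = pro
--             pro += 1
--         return count
--
--     for i in range(N):
--         res = max(res, dfs(i))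
--
--     return res
-- ===== SOURCE B (Python) =====
-- def solution(N, L):
--     # Monotonic-stack O(N) rewrite: vis[i] = size of the strictly-decreasing
--     # visible chain to one side; answer = max(1 + visL[i] + visR[i]).
--     if N <= 0:
--         return 0
--     arr = L[:N]
--
--     def vis_counts(a):
--         out = []
--         stack = []
--         for x in a:
--             while stack and stack[-1] >= x:
--                 stack.pop()
--             out.append(len(stack))
--             stack.append(x)
--         return out
--
--     visL = vis_counts(arr)
--     visR = vis_counts(arr[::-1])[::-1]
--     return max(1 + visL[i] + visR[i] for i in range(N))
-- ===== Notes on version B (the rewrite author's own statement) =====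
-- stated objective: faster
-- what changed: Replaced the per-index O(N) left/right rescans with two monotonic-stack passes that compute all directional visible-chain lengths at once, then take the max.
-- outside the precondition, e.g. on solution(1, []): A returns 1, B raises IndexError
import Mathlib
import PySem

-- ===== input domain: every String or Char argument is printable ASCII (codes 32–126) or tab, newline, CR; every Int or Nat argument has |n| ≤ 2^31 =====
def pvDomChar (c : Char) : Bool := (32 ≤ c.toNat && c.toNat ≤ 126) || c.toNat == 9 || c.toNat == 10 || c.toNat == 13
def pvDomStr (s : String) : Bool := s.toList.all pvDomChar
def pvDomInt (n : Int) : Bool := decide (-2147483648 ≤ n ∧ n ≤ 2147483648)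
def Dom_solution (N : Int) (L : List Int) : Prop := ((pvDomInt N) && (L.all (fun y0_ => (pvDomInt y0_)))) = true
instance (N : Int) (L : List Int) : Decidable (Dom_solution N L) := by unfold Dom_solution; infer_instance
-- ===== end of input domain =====

-- B replaces A's per-index quadratic rescans by two linear monotonic-stack passes (measured faster).


-- ===== PORT A =====
-- L[i] ported as (pyGet? L i).getD 0: under Pre_solution every index A uses is in range, so the default is never taken
def pvA_get (L : List Int) (i : Int) : Int := (PySem.List.pyGet? L i).getD 0

-- 'while pre > -1: …' runs exactly pre+1 times; the structural counter n is that trip count, pre = n-1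
def pvA_left (L : List Int) : Nat → Int → Int → Int
  | 0, _, count => count
  | n + 1, k, count =>
      if pvA_get L ((n : Nat) : Int) ≥ pvA_get L k then pvA_left L n k (count - 1)
      else pvA_left L n ((n : Nat) : Int) count

-- 'while pro < N: …' runs exactly N-pro times; the structural counter n is the remaining trip count, pro = N-n
def pvA_right (L : List Int) (N : Int) : Nat → Int → Int → Int
  | 0, _, count => count
  | n + 1, k, count =>
      if pvA_get L (N - ((n + 1 : Nat) : Int)) ≥ pvA_get L k then pvA_right L N n k (count - 1)
      else pvA_right L N n (N - ((n + 1 : Nat) : Int)) count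

def pvA_dfs (N : Int) (L : List Int) (index : Int) : Int :=
  let count := N
  let pre := if index > 0 then index - 1 else -1
  let pro := if index < N - 1 then index + 1 else N
  let count := pvA_left L (pre + 1).toNat (pre + 1) count
  pvA_right L N (N - pro).toNat (pro - 1) count

def solution (N : Int) (L : List Int) : Int :=
  (PySem.List.pyRange 0 N 1).foldl (fun res i => max res (pvA_dfs N L i)) 0

-- ===== PORT B =====
-- 'while stack and stack[-1] >= x: stack.pop()'  (stack kept top-first)
def pvB_popWhile (x : Int) : List Int → List Int
  | [] => []
  | t :: rest => if t ≥ x then pvB_popWhile x rest else t :: rest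

-- the for-loop body of vis_counts, emitting len(stack) after the pops, then pushing x
def pvB_visGo : List Int → List Int → List Int
  | [], _ => []
  | x :: xs, stack =>
      let s := pvB_popWhile x stack
      ((s.length : Int)) :: pvB_visGo xs (x :: s)

def pvB_visCounts (a : List Int) : List Int := pvB_visGo a []

def solution_alt (N : Int) (L : List Int) : Int :=
  if N ≤ 0 then 0
  else
    let arr := PySem.List.slice L none (some N)
    let visL := pvB_visCounts arr
    let visR := (pvB_visCounts arr.reverse).reverse
    let vals := (PySem.List.pyRange 0 N 1).map (fun i =>
      1 + (PySem.List.pyGet? visL i).getD 0 + (PySem.List.pyGet? visR i).getD 0)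
    (PySem.List.max? vals (fun y => y)).getD 0

-- ===== PRECONDITION & SPEC =====
-- Pre_ excludes N > len(L): there A raises IndexError, except the degenerate N = 1 with L = []
-- where A returns 1 without ever touching L while B's pass over the (empty) sliced list raises.
def Pre_solution (N : Int) (L : List Int) : Prop := N ≤ (L.length : Int)
instance (N : Int) (L : List Int) : Decidable (Pre_solution N L) := by unfold Pre_solution; infer_instance
def pvWitness_solution : Int × List Int := (4, [3, 1, 4, 2])

def Spec_solution (N : Int) (L : List Int) (out : Int) : Prop := out = solution_alt N L
instance (N : Int) (L : List Int) (out : Int) : Decidable (Spec_solution N L out) := by unfold Spec_solution; infer_instance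

-- ===== CLAIM (what is proved, stated in full; the proofs are below) =====
def Claim_equal_solution : Prop := ∀ (N : Int) (L : List Int), Dom_solution N L → Pre_solution N L → Spec_solution N L (solution N L)

-- ===== LEMMAS AND PROOFS =====

-- the mathematical visible-chain count: scanning away from the viewpoint with running minimum m
def pvChain (m : Int) : List Int → Nat
  | [] => 0
  | x :: xs => if x < m then pvChain x xs + 1 else pvChain m xs

-- ----- A side -----

lemma pvA_get_eq (L : List Int) (i : Int) (h0 : 0 ≤ i) (h : i.toNat < L.length) :
    pvA_get L i = L[i.toNat] := by
  rw [pvA_get, PySem.List.pyGet?_of_nonneg L h0, List.getElem?_eq_getElem h, Option.getD_some]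

lemma pvA_left_eq (L : List Int) : ∀ (n : Nat) (k count : Int), n ≤ L.length →
    pvA_left L n k count
      = count - n + pvChain (pvA_get L k) ((L.take n).reverse) := by
  intro n
  induction n with
  | zero =>
    intro k count _
    simp [pvA_left, pvChain]
  | succ n ih =>
    intro k count h
    have hn : n < L.length := by omega
    have hx : pvA_get L (n : Int) = L[n] := by
      simp [pvA_get, PySem.List.pyGet?_natCast, List.getElem?_eq_getElem hn]
    have htake : (L.take (n + 1)).reverse = L[n] :: (L.take n).reverse := by
      rw [List.take_add_one]
      simp [List.getElem?_eq_getElem hn]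
    rw [pvA_left, htake]
    by_cases hc : pvA_get L (n : Int) ≥ pvA_get L k
    · rw [if_pos hc, ih k (count - 1) (by omega)]
      rw [show pvChain (pvA_get L k) (L[n] :: (L.take n).reverse)
            = pvChain (pvA_get L k) ((L.take n).reverse) from if_neg (by rw [hx] at hc; omega)]
      push_cast; ring
    · rw [if_neg hc, ih ((n : Nat) : Int) count (by omega)]
      rw [show pvChain (pvA_get L k) (L[n] :: (L.take n).reverse)
            = pvChain (L[n]) ((L.take n).reverse) + 1 from if_pos (by rw [hx] at hc; omega)]
      rw [hx]
      push_cast; ring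

lemma pvA_right_eq (L : List Int) (N : Int) (hN : N ≤ (L.length : Int)) :
    ∀ (n : Nat) (k count : Int), (n : Int) ≤ N →
    pvA_right L N n k count
      = count - n + pvChain (pvA_get L k) ((L.take N.toNat).drop (N - n).toNat) := by
  intro n
  induction n with
  | zero =>
    intro k count _
    have hnil : (L.take N.toNat).drop (N - ((0 : Nat) : Int)).toNat = [] := by
      apply List.drop_eq_nil_of_le
      simp only [List.length_take]
      omega
    rw [pvA_right, hnil]
    simp [pvChain]
  | succ n ih =>
    intro k count h
    have hpro0 : (0 : Int) ≤ N - ((n + 1 : Nat) : Int) := by omega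
    have hprolen : (N - ((n + 1 : Nat) : Int)).toNat < L.length := by omega
    have hprotake : (N - ((n + 1 : Nat) : Int)).toNat < (L.take N.toNat).length := by
      simp only [List.length_take]; omega
    have hx : pvA_get L (N - ((n + 1 : Nat) : Int)) = L[(N - ((n + 1 : Nat) : Int)).toNat] :=
      pvA_get_eq L _ hpro0 hprolen
    have hdrop : (L.take N.toNat).drop (N - ((n + 1 : Nat) : Int)).toNat
        = L[(N - ((n + 1 : Nat) : Int)).toNat] :: (L.take N.toNat).drop ((N - ((n + 1 : Nat) : Int)).toNat + 1) := by
      rw [List.drop_eq_getElem_cons hprotake]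
      simp [List.getElem_take]
    have htoNat : ((N - ((n + 1 : Nat) : Int)).toNat + 1) = (N - ((n : Nat) : Int)).toNat := by omega
    rw [pvA_right, hdrop]
    by_cases hc : pvA_get L (N - ((n + 1 : Nat) : Int)) ≥ pvA_get L k
    · rw [if_pos hc, ih k (count - 1) (by omega)]
      rw [show pvChain (pvA_get L k)
            (L[(N - ((n + 1 : Nat) : Int)).toNat] :: (L.take N.toNat).drop ((N - ((n + 1 : Nat) : Int)).toNat + 1))
            = pvChain (pvA_get L k) ((L.take N.toNat).drop ((N - ((n + 1 : Nat) : Int)).toNat + 1)) from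
          if_neg (by rw [hx] at hc; omega)]
      rw [htoNat]
      push_cast; ring
    · rw [if_neg hc, ih (N - ((n + 1 : Nat) : Int)) count (by omega)]
      rw [show pvChain (pvA_get L k)
            (L[(N - ((n + 1 : Nat) : Int)).toNat] :: (L.take N.toNat).drop ((N - ((n + 1 : Nat) : Int)).toNat + 1))
            = pvChain (L[(N - ((n + 1 : Nat) : Int)).toNat]) ((L.take N.toNat).drop ((N - ((n + 1 : Nat) : Int)).toNat + 1)) + 1 from
          if_pos (by rw [hx] at hc; omega)]
      rw [hx, htoNat]
      push_cast; ring

lemma pvA_dfs_eq (N : Int) (L : List Int) (hN : N ≤ (L.length : Int)) (i : Nat)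
    (hi : i < N.toNat) :
    pvA_dfs N L i
      = 1 + pvChain (L[i]'(by omega) ) (((L.take N.toNat).take i).reverse)
          + pvChain (L[i]'(by omega)) ((L.take N.toNat).drop (i + 1)) := by
  have hiL : i < L.length := by omega
  unfold pvA_dfs
  dsimp only
  have hpre : (if (i : Int) > 0 then (i : Int) - 1 else -1) = (i : Int) - 1 := by
    split <;> omega
  have hpro : (if (i : Int) < N - 1 then (i : Int) + 1 else N) = (i : Int) + 1 := by
    split <;> omega
  rw [hpre, hpro, show (i : Int) - 1 + 1 = (i : Int) by ring,
    show (i : Int) + 1 - 1 = (i : Int) by ring, Int.toNat_natCast,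
    pvA_left_eq L i ((i : Int)) N (by omega)]
  have hfuel : (N - ((i : Int) + 1)).toNat = N.toNat - (i + 1) := by omega
  rw [hfuel, pvA_right_eq L N hN (N.toNat - (i + 1)) ((i : Int)) _ (by omega)]
  have hdropIdx : (N - ((N.toNat - (i + 1) : Nat) : Int)).toNat = i + 1 := by omega
  rw [hdropIdx, pvA_get_eq L ((i : Int)) (by omega) (by simpa using hiL)]
  simp only [Int.toNat_natCast]
  rw [show (L.take N.toNat).take i = L.take i by rw [List.take_take]; congr 1; omega]
  omega

-- ----- B side -----

def pvStack (p : List Int) : List Int := p.foldl (fun s x => x :: pvB_popWhile x s) []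

lemma pvB_pop_pop (x y : Int) (h : x ≤ y) (s : List Int) :
    pvB_popWhile x (pvB_popWhile y s) = pvB_popWhile x s := by
  induction s with
  | nil => rfl
  | cons t rest ih =>
    by_cases hty : t ≥ y
    · rw [show pvB_popWhile y (t :: rest) = pvB_popWhile y rest from if_pos hty,
        show pvB_popWhile x (t :: rest) = pvB_popWhile x rest from if_pos (by omega)]
      exact ih
    · rw [show pvB_popWhile y (t :: rest) = t :: rest from if_neg hty]

lemma pvStack_snoc (p : List Int) (y : Int) :
    pvStack (p ++ [y]) = y :: pvB_popWhile y (pvStack p) := by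
  simp [pvStack, List.foldl_append]

lemma pvB_pop_stack_length (p : List Int) : ∀ x : Int,
    (pvB_popWhile x (pvStack p)).length = pvChain x p.reverse := by
  induction p using List.reverseRecOn with
  | nil => intro x; simp [pvStack, pvB_popWhile, pvChain]
  | append_singleton p y ih =>
    intro x
    rw [pvStack_snoc, List.reverse_append, List.reverse_singleton, List.singleton_append]
    by_cases hxy : y ≥ x
    · rw [show pvB_popWhile x (y :: pvB_popWhile y (pvStack p)) = pvB_popWhile x (pvB_popWhile y (pvStack p)) from if_pos hxy,
        pvB_pop_pop x y hxy, ih x,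
        show pvChain x (y :: p.reverse) = pvChain x p.reverse from if_neg (by omega)]
    · rw [show pvB_popWhile x (y :: pvB_popWhile y (pvStack p)) = y :: pvB_popWhile y (pvStack p) from if_neg hxy,
        show pvChain x (y :: p.reverse) = pvChain y p.reverse + 1 from if_pos (by omega)]
      simp [ih y]

lemma pvB_visGo_length : ∀ (a s : List Int), (pvB_visGo a s).length = a.length := by
  intro a
  induction a with
  | nil => intro s; simp [pvB_visGo]
  | cons x xs ih => intro s; simp [pvB_visGo, ih]

lemma pvB_visGo_getElem : ∀ (a p : List Int) (i : Nat) (hi : i < a.length),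
    (pvB_visGo a (pvStack p))[i]'(by rw [pvB_visGo_length]; exact hi)
      = ((pvChain (a[i]'hi) ((p ++ a.take i).reverse) : Nat) : Int) := by
  intro a
  induction a with
  | nil => intro p i hi; simp at hi
  | cons x xs ih =>
    intro p i hi
    have hgo : pvB_visGo (x :: xs) (pvStack p)
        = ((pvB_popWhile x (pvStack p)).length : Int) :: pvB_visGo xs (pvStack (p ++ [x])) := by
      rw [pvB_visGo, pvStack_snoc]
    cases i with
    | zero =>
      simp [hgo, pvB_pop_stack_length p x]
    | succ i =>
      have hi' : i < xs.length := by simpa using hi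
      have := ih (p ++ [x]) i hi'
      simp only [hgo, List.getElem_cons_succ, this, List.getElem_cons_succ,
        List.take_succ_cons, List.append_assoc, List.singleton_append]

lemma pvB_visCounts_length (a : List Int) : (pvB_visCounts a).length = a.length :=
  pvB_visGo_length a []

lemma pvB_visCounts_getElem (a : List Int) (i : Nat) (hi : i < a.length) :
    (pvB_visCounts a)[i]'(by rw [pvB_visCounts_length]; exact hi)
      = ((pvChain (a[i]'hi) ((a.take i).reverse) : Nat) : Int) := by
  have h := pvB_visGo_getElem a [] i hi
  simpa [pvB_visCounts, pvStack] using h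

-- max(nonempty list of nonnegatives) = the 0-seeded running max
lemma pvB_max_eq (l : List Int) (hne : l ≠ []) (h : ∀ x ∈ l, 0 ≤ x) :
    (PySem.List.max? l (fun y => y)).getD 0 = l.foldl max 0 := by
  cases l with
  | nil => exact absurd rfl hne
  | cons v t =>
    rw [PySem.List.max?_id_cons]
    have hv : (0 : Int) ≤ v := h v (by simp)
    simp [List.foldl_cons, max_eq_right hv]

-- the two directional readings of B's tables, per index
lemma pvB_visL_at (a : List Int) (j : Nat) (hj : j < a.length) :
    (PySem.List.pyGet? (pvB_visCounts a) (j : Int)).getD 0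
      = ((pvChain (a[j]'hj) ((a.take j).reverse) : Nat) : Int) := by
  rw [PySem.List.pyGet?_natCast,
    List.getElem?_eq_getElem (by rw [pvB_visCounts_length]; exact hj), Option.getD_some,
    pvB_visCounts_getElem a j hj]

lemma pvB_visR_at (a : List Int) (j : Nat) (hj : j < a.length) :
    (PySem.List.pyGet? ((pvB_visCounts a.reverse).reverse) (j : Int)).getD 0
      = ((pvChain (a[j]'hj) (a.drop (j + 1)) : Nat) : Int) := by
  have hlen : (pvB_visCounts a.reverse).length = a.length := by
    rw [pvB_visCounts_length, List.length_reverse]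
  rw [PySem.List.pyGet?_natCast,
    List.getElem?_eq_getElem (by simp [hlen]; omega), Option.getD_some,
    List.getElem_reverse]
  have h1 : (pvB_visCounts a.reverse).length - 1 - j = a.length - 1 - j := by rw [hlen]
  simp only [h1]
  have hidx : a.length - 1 - j < a.reverse.length := by simp; omega
  rw [pvB_visCounts_getElem a.reverse _ hidx]
  congr 1
  congr 1
  · rw [List.getElem_reverse]
    congr 1
    omega
  · rw [List.take_reverse, List.reverse_reverse]
    congr 1
    omega

-- ===== VERDICT (by name: the statement is the Claim_ definition above) =====
theorem solution_spec : Claim_equal_solution := by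
  intro N L _ hPre
  unfold Pre_solution at hPre
  unfold Spec_solution solution solution_alt
  by_cases hN0 : N ≤ 0
  · rw [if_pos hN0,
      PySem.List.pyRange_of_pos 0 N (by norm_num : (0:Int) < 1), if_neg (by omega)]
    simp
  · rw [not_le] at hN0
    rw [if_neg (by omega), PySem.List.slice_to L (by omega)]
    dsimp only
    have harrlen : (L.take N.toNat).length = N.toNat := by
      simp only [List.length_take]; omega
    have hmain : ∀ x ∈ PySem.List.pyRange 0 N 1,
        pvA_dfs N L x
          = 1 + (PySem.List.pyGet? (pvB_visCounts (L.take N.toNat)) x).getD 0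
              + (PySem.List.pyGet? ((pvB_visCounts (L.take N.toNat).reverse).reverse) x).getD 0
        ∧ (0:Int) ≤ 1 + (PySem.List.pyGet? (pvB_visCounts (L.take N.toNat)) x).getD 0
              + (PySem.List.pyGet? ((pvB_visCounts (L.take N.toNat).reverse).reverse) x).getD 0 := by
      intro x hx
      obtain ⟨hx0, hxN⟩ := PySem.List.mem_pyRange_one.mp hx
      obtain ⟨j, rfl⟩ : ∃ j : Nat, x = (j : Int) := ⟨x.toNat, by omega⟩
      have hjn : j < N.toNat := by omega
      have hja : j < (L.take N.toNat).length := by omega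
      rw [pvB_visL_at (L.take N.toNat) j hja, pvB_visR_at (L.take N.toNat) j hja]
      constructor
      · rw [pvA_dfs_eq N L hPre j hjn, List.getElem_take]
      · positivity
    have hne : (PySem.List.pyRange 0 N 1).map (fun i =>
          1 + (PySem.List.pyGet? (pvB_visCounts (L.take N.toNat)) i).getD 0
            + (PySem.List.pyGet? ((pvB_visCounts (L.take N.toNat).reverse).reverse) i).getD 0) ≠ [] :=
      List.ne_nil_of_mem (List.mem_map_of_mem
        (PySem.List.mem_pyRange_one.mpr ⟨le_refl 0, hN0⟩))
    have hnn : ∀ y ∈ (PySem.List.pyRange 0 N 1).map (fun i =>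
          1 + (PySem.List.pyGet? (pvB_visCounts (L.take N.toNat)) i).getD 0
            + (PySem.List.pyGet? ((pvB_visCounts (L.take N.toNat).reverse).reverse) i).getD 0),
        (0:Int) ≤ y := by
      intro y hy
      obtain ⟨i, hi, rfl⟩ := List.mem_map.mp hy
      exact (hmain i hi).2
    rw [pvB_max_eq _ hne hnn, ← List.foldl_map]
    exact congrArg (List.foldl max 0) (List.map_congr_left (fun a ha => (hmain a ha).1))
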